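-- pv_equiv track=rewrite | github.com/981377660LMT/algorithm-study | 22_专题/atMoskK/平方和在范围里的对数.py | solve
-- ===== SOURCE A (Python) =====
-- def solve(a, b, lower, upper):
--     def atMoskK(threshold):
--         left = 0
--         right = len(b) - 1
--         res = 0
--         while left < len(a) and right >= 0:
--             if a[left] ** 2 + b[right] ** 2 <= threshold:
--                 res += right + 1  # 0 到 right 都可以
--                 left += 1
--             else:
--                 right -= 1
--         return res
--
--     a = sorted([abs(x) for x in a])
--     b = sorted([abs(x) for x in b])
--     return atMoskK(upper) - atMoskK(lower - 1)
-- ===== SOURCE B (Python) =====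
-- def solve(a, b, lower, upper):
--     a = sorted(abs(x) for x in a)
--     b = sorted(abs(x) for x in b)
--
--     def at_most(threshold):
--         res = 0
--         for x in a:
--             # hand-written bisect_right on the exact comparison x**2 + b[mid]**2 <= threshold
--             lo, hi = 0, len(b) - 1
--             while lo <= hi:
--                 mid = (lo + hi) // 2
--                 if x ** 2 + b[mid] ** 2 <= threshold:
--                     lo = mid + 1
--                 else:
--                     hi = mid - 1
--             res += lo
--         return res
--
--     return at_most(upper) - at_most(lower - 1)
-- ===== Notes on version B (the rewrite author's own statement) =====
-- stated objective: alternative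
-- what changed: replaces the coordinated two-pointer sweep over (sorted |a|, sorted |b|) by, for each x in sorted |a|, a hand-written binary search (bisect_right using the exact comparison x**2 + b[mid]**2 <= threshold) counting the qualifying y in sorted |b|
import Mathlib
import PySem

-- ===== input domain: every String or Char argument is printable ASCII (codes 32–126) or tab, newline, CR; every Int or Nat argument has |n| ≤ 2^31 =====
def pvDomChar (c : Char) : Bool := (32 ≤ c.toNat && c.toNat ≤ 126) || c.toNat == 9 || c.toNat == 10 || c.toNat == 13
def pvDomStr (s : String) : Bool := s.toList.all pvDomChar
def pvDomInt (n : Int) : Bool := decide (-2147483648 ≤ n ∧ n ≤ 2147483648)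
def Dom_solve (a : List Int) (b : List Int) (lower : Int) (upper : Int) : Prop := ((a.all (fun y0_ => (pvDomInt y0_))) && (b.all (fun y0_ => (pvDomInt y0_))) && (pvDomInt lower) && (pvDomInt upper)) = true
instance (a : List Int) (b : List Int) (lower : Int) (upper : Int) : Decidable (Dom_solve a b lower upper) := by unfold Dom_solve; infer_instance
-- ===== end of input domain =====

-- B replaces A's two-pointer sweep by a per-element hand-written binary search (alternative
-- decomposition, similar cost); return values proved equal on all inputs.

-- ===== PORT A =====
-- the while loop of atMoskK, totalised by a fuel counter (a.length + b.length steps always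
-- suffice, see loopA_eq/loopA_top); b-index `right` stays < b.length throughout actual calls,
-- so `getD _ 0` is exact for the in-range accesses a[left], b[right]
def loopA (a b : List Int) (t : Int) : Nat → Nat → Int → Int → Int
  | 0, _, _, res => res
  | fuel + 1, left, right, res =>
    if 0 ≤ right then
      if left < a.length then
        if (a.getD left 0) ^ 2 + (b.getD right.toNat 0) ^ 2 ≤ t then
          loopA a b t fuel (left + 1) right (res + right + 1)
        else
          loopA a b t fuel left (right - 1) res
      else res
    else res

def solve (a : List Int) (b : List Int) (lower : Int) (upper : Int) : Int :=
  let a2 := PySem.List.sorted (a.map (fun x => |x|)) (fun x => x) false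
  let b2 := PySem.List.sorted (b.map (fun x => |x|)) (fun x => x) false
  loopA a2 b2 upper (a2.length + b2.length) 0 ((b2.length : Int) - 1) 0
    - loopA a2 b2 (lower - 1) (a2.length + b2.length) 0 ((b2.length : Int) - 1) 0

-- ===== PORT B =====
-- the inner while loop: hand-written bisect_right, totalised by a fuel counter (b.length
-- steps always suffice, see bsearch_eq/atMostB_eq); mid stays in [0, b.length) whenever
-- entered from at_most, so `getD _ 0` is exact for the access b[mid]
def bsearch (b : List Int) (t x : Int) : Nat → Int → Int → Int
  | 0, lo, _ => lo
  | fuel + 1, lo, hi =>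
    if lo ≤ hi then
      let mid := PySem.Int.floordiv (lo + hi) 2
      if x ^ 2 + (b.getD mid.toNat 0) ^ 2 ≤ t then
        bsearch b t x fuel (mid + 1) hi
      else
        bsearch b t x fuel lo (mid - 1)
    else lo

def atMostB (a b : List Int) (t : Int) : Int :=
  a.foldl (fun res x => res + bsearch b t x b.length 0 ((b.length : Int) - 1)) 0

def solve_alt (a : List Int) (b : List Int) (lower : Int) (upper : Int) : Int :=
  let a2 := PySem.List.sorted (a.map (fun x => |x|)) (fun x => x) false
  let b2 := PySem.List.sorted (b.map (fun x => |x|)) (fun x => x) false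
  atMostB a2 b2 upper - atMostB a2 b2 (lower - 1)

-- ===== PRECONDITION & SPEC =====
def Spec_solve (a : List Int) (b : List Int) (lower : Int) (upper : Int) (out : Int) : Prop := out = solve_alt a b lower upper
instance (a : List Int) (b : List Int) (lower : Int) (upper : Int) (out : Int) : Decidable (Spec_solve a b lower upper out) := by unfold Spec_solve; infer_instance

-- ===== CLAIM =====
def Claim_equal_solve : Prop := ∀ (a : List Int) (b : List Int) (lower : Int) (upper : Int), Dom_solve a b lower upper → Spec_solve a b lower upper (solve a b lower upper)

-- ===== LEMMAS AND PROOFS =====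

-- the count both loops compute per element x : number of y in b with x² + y² ≤ t
def cnt (b : List Int) (t x : Int) : Int :=
  ((b.filter (fun y => decide (x ^ 2 + y ^ 2 ≤ t))).length : Int)

lemma sq_mono {u v : Int} (h0 : 0 ≤ u) (h : u ≤ v) : u ^ 2 ≤ v ^ 2 := by nlinarith

lemma pairwise_getElem_le (l : List Int) (h : l.Pairwise (· ≤ ·)) (i j : Nat)
    (hij : i ≤ j) (hj : j < l.length) : l[i]'(by omega) ≤ l[j] := by
  rcases Nat.eq_or_lt_of_le hij with rfl | hlt
  · exact le_refl _
  · exact List.pairwise_iff_getElem.mp h i j (by omega) hj hlt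

-- cnt equals k when the predicate holds exactly on the first k indices
lemma cnt_eq (b : List Int) (t x : Int) (k : Nat) (hk : k ≤ b.length)
    (hin : ∀ j (hj : j < k), x ^ 2 + (b[j]'(by omega)) ^ 2 ≤ t)
    (hout : ∀ j (hj : j < b.length), k ≤ j → ¬ (x ^ 2 + (b[j]'hj) ^ 2 ≤ t)) :
    cnt b t x = (k : Int) := by
  induction b generalizing k with
  | nil =>
    have : k = 0 := by simpa using hk
    subst this
    simp [cnt]
  | cons y ys ih =>
    cases k with
    | zero =>
      have hall : (y :: ys).filter (fun z => decide (x ^ 2 + z ^ 2 ≤ t)) = [] := by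
        refine List.filter_eq_nil_iff.mpr ?_
        intro z hz
        rcases List.mem_iff_getElem.mp hz with ⟨j, hj, rfl⟩
        simpa using hout j hj (by omega)
      simp [cnt, hall]
    | succ k' =>
      have hy : x ^ 2 + y ^ 2 ≤ t := by simpa using hin 0 (by omega)
      have hrec : cnt ys t x = (k' : Int) := by
        refine ih k' (by simpa using hk) ?_ ?_
        · intro j hj
          simpa using hin (j + 1) (by omega)
        · intro j hj hkj
          simpa using hout (j + 1) (by simpa using Nat.succ_lt_succ hj) (by omega)
      simp only [cnt, List.filter_cons] at hrec ⊢
      rw [if_pos (by simpa using hy)]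
      simp only [List.length_cons]
      push_cast at hrec ⊢
      omega

-- ===== A-side: the two-pointer sweep computes Σ_{x ∈ a.drop left} cnt b t x =====
lemma loopA_eq (a b : List Int) (t : Int)
    (ha : a.Pairwise (· ≤ ·)) (ha0 : ∀ x ∈ a, 0 ≤ x)
    (hb : b.Pairwise (· ≤ ·)) (hb0 : ∀ y ∈ b, 0 ≤ y) :
    ∀ fuel left (right : Int) res, (a.length - left) + (right + 1).toNat ≤ fuel →
      right < (b.length : Int) →
      (∀ (hL : left < a.length) j (hj : j < b.length), right < (j : Int) →
          ¬ ((a[left]'hL) ^ 2 + (b[j]'hj) ^ 2 ≤ t)) →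
      loopA a b t fuel left right res = res + ((a.drop left).map (cnt b t)).sum := by
  intro fuel
  induction fuel with
  | zero =>
    intro left right res hn hr hinv
    rw [loopA, List.drop_eq_nil_of_le (by omega)]
    simp
  | succ fuel ih =>
    intro left right res hn hr hinv
    rw [loopA]
    by_cases h0 : 0 ≤ right
    · rw [if_pos h0]
      by_cases h1 : left < a.length
      · rw [if_pos h1]
        have hrt : right.toNat < b.length := by omega
        have hga : a.getD left 0 = a[left]'h1 := List.getD_eq_getElem a 0 h1
        have hgb : b.getD right.toNat 0 = b[right.toNat]'hrt := List.getD_eq_getElem b 0 hrt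
        rw [hga, hgb]
        by_cases hc : (a[left]'h1) ^ 2 + (b[right.toNat]'hrt) ^ 2 ≤ t
        · rw [if_pos hc]
          -- a[left] is fully counted: cnt b t a[left] = right + 1
          have hcnt : cnt b t (a[left]'h1) = right + 1 := by
            have := cnt_eq b t (a[left]'h1) (right + 1).toNat (by omega)
              (by
                intro j hj
                have hjb : j < b.length := by omega
                have hle : b[j]'hjb ≤ b[right.toNat]'hrt :=
                  pairwise_getElem_le b hb j right.toNat (by omega) hrt
                have h0j : 0 ≤ b[j]'hjb := hb0 _ (List.getElem_mem hjb)
                have := sq_mono h0j hle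
                omega)
              (by
                intro j hj hkj
                exact hinv h1 j hj (by omega))
            rw [this]; omega
          have hrec := ih (left + 1) right (res + right + 1) (by omega) hr
            (by
              intro hL' j hj hjr
              have hle : a[left]'h1 ≤ a[left + 1]'hL' :=
                pairwise_getElem_le a ha left (left + 1) (by omega) hL'
              have h0l : 0 ≤ a[left]'h1 := ha0 _ (List.getElem_mem h1)
              have hsq := sq_mono h0l hle
              have := hinv h1 j hj hjr
              omega)
          rw [hrec]
          rw [List.drop_eq_getElem_cons h1, List.map_cons, List.sum_cons, hcnt]
          ring
        · rw [if_neg hc]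
          have hrec := ih left (right - 1) res (by omega) (by omega)
            (by
              intro hL j hj hjr
              by_cases hje : (j : Int) = right
              · have : j = right.toNat := by omega
                subst this
                exact hc
              · exact hinv hL j hj (by omega))
          exact hrec
      · rw [if_neg h1]
        rw [List.drop_eq_nil_of_le (by omega)]
        simp
    · rw [if_neg h0]
      -- right < 0 : every remaining element contributes 0
      have hz : ∀ z ∈ (a.drop left).map (cnt b t), z = 0 := by
        intro z hz
        rcases List.mem_map.mp hz with ⟨x, hx, rfl⟩
        rcases List.mem_iff_getElem.mp hx with ⟨i, hi, rfl⟩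
        have hlen : left + i < a.length := by
          have := List.length_drop (l := a) (i := left); omega
        have hL : left < a.length := by omega
        rw [List.getElem_drop]
        have hle : a[left]'hL ≤ a[left + i]'hlen :=
          pairwise_getElem_le a ha left (left + i) (by omega) hlen
        have h0l : 0 ≤ a[left]'hL := ha0 _ (List.getElem_mem hL)
        have hsq := sq_mono h0l hle
        exact cnt_eq b t _ 0 (by omega) (by omega)
          (fun j hj _ => by have := hinv hL j hj (by omega); omega)
      rw [List.sum_eq_zero hz]
      ring

-- ===== B-side: the binary search computes cnt b t x =====
lemma bsearch_eq (b : List Int) (t x : Int)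
    (hb : b.Pairwise (· ≤ ·)) (hb0 : ∀ y ∈ b, 0 ≤ y) :
    ∀ fuel (lo hi : Int), (hi + 1 - lo).toNat ≤ fuel → 0 ≤ lo → lo ≤ hi + 1 →
      hi < (b.length : Int) →
      (∀ j (hj : j < b.length), (j : Int) < lo → x ^ 2 + (b[j]'hj) ^ 2 ≤ t) →
      (∀ j (hj : j < b.length), hi < (j : Int) → ¬ (x ^ 2 + (b[j]'hj) ^ 2 ≤ t)) →
      bsearch b t x fuel lo hi = cnt b t x := by
  intro fuel
  induction fuel with
  | zero =>
    intro lo hi hn hlo0 hlohi hhib hbelow habove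
    rw [bsearch]
    have := cnt_eq b t x lo.toNat (by omega)
      (by intro j hj; exact hbelow j (by omega) (by omega))
      (by intro j hj hkj; exact habove j hj (by omega))
    rw [this]; omega
  | succ fuel ih =>
    intro lo hi hn hlo0 hlohi hhib hbelow habove
    rw [bsearch]
    by_cases hcond : lo ≤ hi
    · rw [if_pos hcond]
      have hmid := PySem.Int.floordiv_two_mid_bounds hcond
      generalize hmd : PySem.Int.floordiv (lo + hi) 2 = mid at hmid
      show (if x ^ 2 + (b.getD mid.toNat 0) ^ 2 ≤ t then bsearch b t x fuel (mid + 1) hi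
            else bsearch b t x fuel lo (mid - 1)) = cnt b t x
      have hmt : mid.toNat < b.length := by omega
      have hg : b.getD mid.toNat 0 = b[mid.toNat]'hmt := List.getD_eq_getElem b 0 hmt
      rw [hg]
      by_cases hc : x ^ 2 + (b[mid.toNat]'hmt) ^ 2 ≤ t
      · rw [if_pos hc]
        refine ih (mid + 1) hi (by omega) (by omega) (by omega) hhib ?_ habove
        intro j hj hjlt
        have hle : b[j]'hj ≤ b[mid.toNat]'hmt :=
          pairwise_getElem_le b hb j mid.toNat (by omega) hmt
        have h0j : 0 ≤ b[j]'hj := hb0 _ (List.getElem_mem hj)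
        have := sq_mono h0j hle
        omega
      · rw [if_neg hc]
        refine ih lo (mid - 1) (by omega) hlo0 (by omega) (by omega) hbelow ?_
        intro j hj hjgt
        have hle : b[mid.toNat]'hmt ≤ b[j]'hj :=
          pairwise_getElem_le b hb mid.toNat j (by omega) hj
        have h0m : 0 ≤ b[mid.toNat]'hmt := hb0 _ (List.getElem_mem hmt)
        have := sq_mono h0m hle
        omega
    · rw [if_neg hcond]
      have := cnt_eq b t x lo.toNat (by omega)
        (by intro j hj; exact hbelow j (by omega) (by omega))
        (by intro j hj hkj; exact habove j hj (by omega))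
      rw [this]; omega

-- the fold of binary searches is Σ cnt
lemma atMostB_eq (a b : List Int) (t : Int)
    (hb : b.Pairwise (· ≤ ·)) (hb0 : ∀ y ∈ b, 0 ≤ y) :
    atMostB a b t = (a.map (cnt b t)).sum := by
  have hstep : ∀ (x : Int), bsearch b t x b.length 0 ((b.length : Int) - 1) = cnt b t x := by
    intro x
    exact bsearch_eq b t x hb hb0 b.length 0 ((b.length : Int) - 1) (by omega) (by omega)
      (by omega) (by omega) (fun j hj h => by omega) (fun j hj h => by omega)
  unfold atMostB
  induction a using List.reverseRecOn with
  | nil => simp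
  | append_singleton xs x ihx => simp [ihx, hstep x]

-- both starting configurations: A's full sweep gives the same sum
lemma loopA_top (a b : List Int) (t : Int)
    (ha : a.Pairwise (· ≤ ·)) (ha0 : ∀ x ∈ a, 0 ≤ x)
    (hb : b.Pairwise (· ≤ ·)) (hb0 : ∀ y ∈ b, 0 ≤ y) :
    loopA a b t (a.length + b.length) 0 ((b.length : Int) - 1) 0 = (a.map (cnt b t)).sum := by
  have := loopA_eq a b t ha ha0 hb hb0 (a.length + b.length) 0 ((b.length : Int) - 1) 0
    (by omega) (by omega) (fun hL j hj hjr => by omega)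
  simpa using this

theorem solve_spec : Claim_equal_solve := by
  intro a b lower upper _
  unfold Spec_solve solve solve_alt
  show loopA (PySem.List.sorted (a.map (fun x => |x|)) (fun x => x) false)
        (PySem.List.sorted (b.map (fun x => |x|)) (fun x => x) false) upper
        ((PySem.List.sorted (a.map (fun x => |x|)) (fun x => x) false).length
          + (PySem.List.sorted (b.map (fun x => |x|)) (fun x => x) false).length) 0
        (((PySem.List.sorted (b.map (fun x => |x|)) (fun x => x) false).length : Int) - 1) 0
      - loopA (PySem.List.sorted (a.map (fun x => |x|)) (fun x => x) false)
        (PySem.List.sorted (b.map (fun x => |x|)) (fun x => x) false) (lower - 1)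
        ((PySem.List.sorted (a.map (fun x => |x|)) (fun x => x) false).length
          + (PySem.List.sorted (b.map (fun x => |x|)) (fun x => x) false).length) 0
        (((PySem.List.sorted (b.map (fun x => |x|)) (fun x => x) false).length : Int) - 1) 0
      = atMostB (PySem.List.sorted (a.map (fun x => |x|)) (fun x => x) false)
          (PySem.List.sorted (b.map (fun x => |x|)) (fun x => x) false) upper
        - atMostB (PySem.List.sorted (a.map (fun x => |x|)) (fun x => x) false)
          (PySem.List.sorted (b.map (fun x => |x|)) (fun x => x) false) (lower - 1)
  set a2 := PySem.List.sorted (a.map (fun x => |x|)) (fun x => x) false with ha2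
  set b2 := PySem.List.sorted (b.map (fun x => |x|)) (fun x => x) false with hb2
  have ha : a2.Pairwise (· ≤ ·) := PySem.List.sorted_pairwise _ _
  have hbp : b2.Pairwise (· ≤ ·) := PySem.List.sorted_pairwise _ _
  have ha0 : ∀ x ∈ a2, 0 ≤ x := by
    intro x hx
    rw [ha2, PySem.List.mem_sorted] at hx
    rcases List.mem_map.mp hx with ⟨y, _, rfl⟩
    exact abs_nonneg y
  have hb0 : ∀ y ∈ b2, 0 ≤ y := by
    intro y hy
    rw [hb2, PySem.List.mem_sorted] at hy
    rcases List.mem_map.mp hy with ⟨z, _, rfl⟩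
    exact abs_nonneg z
  rw [loopA_top a2 b2 upper ha ha0 hbp hb0,
      loopA_top a2 b2 (lower - 1) ha ha0 hbp hb0,
      atMostB_eq a2 b2 upper hbp hb0,
      atMostB_eq a2 b2 (lower - 1) hbp hb0]
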